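-- pv_equiv track=rewrite | github.com/USEPA/ElectricityLCI | electricitylci/utils.py | get_stewi_invent_years
-- ===== SOURCE A (Python) =====
-- def get_stewi_invent_years(year):
--     """Helper function to return inventory years of interest from StEWI.
--     See https://github.com/USEPA/standardizedinventories for inventory names
--     and years, which are hard-coded here.
--
--     Parameters
--     ----------
--     year : int
--         An inventory vintage (e.g., 2020).
--
--     Returns
--     -------
--         dict
--             A dictionary of inventory codes and their most recent year of
--             data available (less than or equal to the year provided).
--
--     Notes
--     -----
--     This method answers the question, which inventories of interest should
--     go into the modelconfig files (``inventories_of_interest`` attribute) for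
--     a given year.
--
--     Depends on :func:`linear_search`.
--
--     In eLCI, the inventories of interest configuration parameter cares about
--     the following data providers,
--
--     - eGRID
--     - TRI
--     - NEI
--     - RCRAInfo
--
--     Examples
--     --------
--     >>> get_stewi_invent_years(2019)
--     """
--     # A dictionary of StEWI inventories and their available vintages
--     # NOTE: inventories not considered in eLCI are commented out.
--     STEWI_DATA_VINTAGES = {
--         # 'DMR': [x for x in range(2011, 2023, 1)],
--         # 'GHGRP': [x for x in range(2011, 2023, 1)],
--         'eGRID': [2014, 2016, 2018, 2019, 2020, 2021],
--         'NEI': [2011, 2014, 2017, 2020],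
--         'RCRAInfo': [x for x in range(2011, 2023, 2)],
--         'TRI': [x for x in range(2011, 2023, 1)],
--     }
--
--     r_dict = {}
--     for key in STEWI_DATA_VINTAGES.keys():
--         avail_years = STEWI_DATA_VINTAGES[key]
--         y_idx = linear_search(avail_years, year)
--         if y_idx != -1:
--             r_dict[key] = STEWI_DATA_VINTAGES[key][y_idx]
--     return r_dict
--
-- def linear_search(lst, target):
--     """Backwards search for the value less than or equal to a given value.
--
--     Parameters
--     ----------
--     lst : list
--         A list of numerically sorted data (lowest to highest).
--     target : int, float
--         A target value (e.g., year).
--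
--     Returns
--     -------
--     int
--         The index of the search list associated with the value equal to or
--         less than the target, else -1 for a target out-of-range (i.e., smaller than the smallest entry in the list).
--
--     Examples
--     --------
--     >>> NEI_YEARS = [2011, 2014, 2017, 2020]
--     >>> linear_search(NEI_YEARS, 2020)
--     3
--     >>> linear_search(NEI_YEARS, 2019)
--     2
--     >>> linear_search(NEI_YEARS, 2018)
--     2
--     >>> linear_search(NEI_YEARS, 2010)
--     -1
--     """
--     for i in range(len(lst) - 1, -1, -1):
--         if lst[i] <= target:
--             return i
--     return -1
-- ===== SOURCE B (Python) =====
-- def _bisect_right(a, x):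
--     """Hand-written bisect_right: index of first element > x in sorted a."""
--     lo, hi = 0, len(a)
--     while lo < hi:
--         mid = (lo + hi) // 2
--         if x < a[mid]:
--             hi = mid
--         else:
--             lo = mid + 1
--     return lo
--
--
-- def get_stewi_invent_years(year):
--     vintages = {
--         'eGRID': [2014, 2016, 2018, 2019, 2020, 2021],
--         'NEI': [2011, 2014, 2017, 2020],
--         'RCRAInfo': [2011, 2013, 2015, 2017, 2019, 2021],
--         'TRI': [2011, 2012, 2013, 2014, 2015, 2016, 2017, 2018, 2019,
--                 2020, 2021, 2022],
--     }
--     r_dict = {}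
--     for key, avail in vintages.items():
--         idx = _bisect_right(avail, year) - 1
--         if idx >= 0:
--             r_dict[key] = avail[idx]
--     return r_dict
-- ===== Notes on version B (the rewrite author's own statement) =====
-- stated objective: idiomatic
-- what changed: Replaced the backward linear scan helper (returning an index, -1 sentinel) with a binary search (bisect_right - 1) per inventory list, inlining the lookup of each vintage list into one pass over the dict items.
import Mathlib
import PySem

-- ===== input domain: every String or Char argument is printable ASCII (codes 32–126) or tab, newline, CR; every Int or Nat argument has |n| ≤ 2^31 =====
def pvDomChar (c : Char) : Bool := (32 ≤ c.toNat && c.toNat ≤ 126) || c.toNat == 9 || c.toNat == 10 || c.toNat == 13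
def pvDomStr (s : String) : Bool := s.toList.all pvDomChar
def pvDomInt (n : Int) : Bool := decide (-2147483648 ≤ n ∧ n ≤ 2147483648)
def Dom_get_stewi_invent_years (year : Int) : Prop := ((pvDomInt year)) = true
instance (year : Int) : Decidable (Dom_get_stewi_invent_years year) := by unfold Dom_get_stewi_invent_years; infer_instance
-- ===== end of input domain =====

-- B replaces A's backward linear scan (index + -1 sentinel) with a hand-written
-- binary search (bisect_right - 1) per inventory list; same returned dict.


-- ===== PORT A =====
-- A's vintage dictionary (insertion order preserved); ranges via PySem.List.pyRange.
def pvSTEWI : PySem.Dict String (List Int) :=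
  PySem.Dict.ofList
    [("eGRID", [2014, 2016, 2018, 2019, 2020, 2021]),
     ("NEI", [2011, 2014, 2017, 2020]),
     ("RCRAInfo", PySem.List.pyRange 2011 2023 2),
     ("TRI", PySem.List.pyRange 2011 2023 1)]

-- linear_search's loop over range(len(lst)-1, -1, -1); early return = recursion result.
-- pyGet? is always in range for these indices (the none branch is unreachable).
def pvLSgo (lst : List Int) (target : Int) : List Int → Int
  | [] => -1
  | i :: rest =>
    match PySem.List.pyGet? lst i with
    | some v => if v ≤ target then i else pvLSgo lst target rest
    | none => pvLSgo lst target rest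

def linear_search (lst : List Int) (target : Int) : Int :=
  pvLSgo lst target (PySem.List.pyRange ((lst.length : Int) - 1) (-1) (-1))

def get_stewi_invent_years (year : Int) : List (String × Int) :=
  ((pvSTEWI.keys).foldl
    (fun (r : PySem.Dict String Int) key =>
      let avail_years := (pvSTEWI.get? key).getD []
      let y_idx := linear_search avail_years year
      if y_idx ≠ -1 then
        r.insert key ((PySem.List.pyGet? avail_years y_idx).getD 0)
      else r) PySem.Dict.empty).items

-- ===== PORT B =====
-- B's vintage dictionary, lists written out as literals (as in Source B).
def pvSTEWIB : PySem.Dict String (List Int) :=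
  PySem.Dict.ofList
    [("eGRID", [2014, 2016, 2018, 2019, 2020, 2021]),
     ("NEI", [2011, 2014, 2017, 2020]),
     ("RCRAInfo", [2011, 2013, 2015, 2017, 2019, 2021]),
     ("TRI", [2011, 2012, 2013, 2014, 2015, 2016, 2017, 2018, 2019, 2020, 2021, 2022])]

-- hand-written bisect_right while-loop from Source B; the fuel argument only bounds
-- the loop (a.length iterations always suffice, the interval halves each step)
-- and makes the recursion structural; it never changes the result.
def pvBRgo (a : List Int) (x : Int) : Nat → Nat → Nat → Nat
  | lo, _, 0 => lo
  | lo, hi, fuel + 1 =>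
    if lo < hi then
      let mid := (lo + hi) / 2
      if x < a.getD mid 0 then pvBRgo a x lo mid fuel
      else pvBRgo a x (mid + 1) hi fuel
    else lo

def pvBisectRight (a : List Int) (x : Int) : Nat := pvBRgo a x 0 a.length a.length

def get_stewi_invent_years_alt (year : Int) : List (String × Int) :=
  ((pvSTEWIB.items).foldl
    (fun (r : PySem.Dict String Int) kv =>
      let idx : Int := (pvBisectRight kv.2 year : Int) - 1
      if 0 ≤ idx then r.insert kv.1 (kv.2.getD idx.toNat 0)
      else r) PySem.Dict.empty).items

-- ===== PRECONDITION & SPEC =====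
def Spec_get_stewi_invent_years (year : Int) (out : List (String × Int)) : Prop := out = get_stewi_invent_years_alt year
instance (year : Int) (out : List (String × Int)) : Decidable (Spec_get_stewi_invent_years year out) := by unfold Spec_get_stewi_invent_years; infer_instance

-- ===== CLAIM (what is proved, stated in full; the proofs are below) =====
def Claim_equal_get_stewi_invent_years : Prop := ∀ (year : Int), Dom_get_stewi_invent_years year → Spec_get_stewi_invent_years year (get_stewi_invent_years year)

-- ===== LEMMAS AND PROOFS =====

-- concrete evaluations used to unfold the two ports at a symbolic year
lemma pv_keys : pvSTEWI.keys = ["eGRID", "NEI", "RCRAInfo", "TRI"] := by decide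
lemma pv_g1 : (pvSTEWI.get? "eGRID").getD [] = [2014, 2016, 2018, 2019, 2020, 2021] := by decide
lemma pv_g2 : (pvSTEWI.get? "NEI").getD [] = [2011, 2014, 2017, 2020] := by decide
lemma pv_g3 : (pvSTEWI.get? "RCRAInfo").getD [] = [2011, 2013, 2015, 2017, 2019, 2021] := by decide
lemma pv_g4 : (pvSTEWI.get? "TRI").getD [] = [2011, 2012, 2013, 2014, 2015, 2016, 2017, 2018, 2019, 2020, 2021, 2022] := by decide
lemma pv_itemsB : pvSTEWIB.items =
    [("eGRID", [2014, 2016, 2018, 2019, 2020, 2021]),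
     ("NEI", [2011, 2014, 2017, 2020]),
     ("RCRAInfo", [2011, 2013, 2015, 2017, 2019, 2021]),
     ("TRI", [2011, 2012, 2013, 2014, 2015, 2016, 2017, 2018, 2019, 2020, 2021, 2022])] := by decide

-- the backward scan returns -1 when the target is below every list element
lemma pvLSgo_none (lst : List Int) (x : Int) (h : ∀ v ∈ lst, x < v) :
    ∀ idxs : List Int, pvLSgo lst x idxs = -1 := by
  intro idxs
  induction idxs with
  | nil => rfl
  | cons i rest ih =>
    simp only [pvLSgo]
    cases hg : PySem.List.pyGet? lst i with
    | none => exact ih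
    | some v =>
      have hv : v ∈ lst := PySem.List.mem_of_pyGet?_eq_some lst hg
      show (if v ≤ x then i else pvLSgo lst x rest) = -1
      rw [if_neg (by have := h v hv; omega)]
      exact ih

-- the backward scan returns the first index of its index list when that
-- index holds a value ≤ the target
lemma pvLSgo_head (lst : List Int) (x i : Int) (rest : List Int) (v : Int)
    (hv : PySem.List.pyGet? lst i = some v) (h : v ≤ x) :
    pvLSgo lst x (i :: rest) = i := by
  simp only [pvLSgo, hv]
  show (if v ≤ x then i else pvLSgo lst x rest) = i
  exact if_pos h

lemma pvls_low (L : List Int) (x : Int) (h : ∀ v ∈ L, x < v) :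
    linear_search L x = -1 := by
  unfold linear_search
  exact pvLSgo_none L x h _

-- index lists range(len-1, -1, -1) for the three list lengths that occur
lemma pv_r6 : PySem.List.pyRange 5 (-1) (-1) = [5, 4, 3, 2, 1, 0] := by decide
lemma pv_r4 : PySem.List.pyRange 3 (-1) (-1) = [3, 2, 1, 0] := by decide
lemma pv_r12 : PySem.List.pyRange 11 (-1) (-1) = [11, 10, 9, 8, 7, 6, 5, 4, 3, 2, 1, 0] := by decide

-- the binary search stays at lo when the target is below every list element
lemma pvBRgo_low (a : List Int) (x : Int) (h : ∀ v ∈ a, x < v) :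
    ∀ fuel lo hi : Nat, hi ≤ a.length → pvBRgo a x lo hi fuel = lo := by
  intro fuel
  induction fuel with
  | zero => intro lo hi _; rfl
  | succ f ih =>
    intro lo hi hhi
    simp only [pvBRgo]
    by_cases hlt : lo < hi
    · rw [if_pos hlt]
      have hmid : (lo + hi) / 2 < a.length := by omega
      have hget : a.getD ((lo + hi) / 2) 0 = a[(lo + hi) / 2] := List.getD_eq_getElem a 0 hmid
      have hmem : a[(lo + hi) / 2] ∈ a := List.getElem_mem hmid
      rw [if_pos (by rw [hget]; exact h _ hmem)]
      exact ih lo ((lo + hi) / 2) (by omega)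
    · exact if_neg hlt

-- the binary search reaches hi when every list element is ≤ the target
lemma pvBRgo_high (a : List Int) (x : Int) (h : ∀ v ∈ a, v ≤ x) :
    ∀ fuel lo hi : Nat, lo ≤ hi → hi ≤ a.length → hi - lo ≤ fuel → pvBRgo a x lo hi fuel = hi := by
  intro fuel
  induction fuel with
  | zero =>
    intro lo hi h1 _ h3
    have heq : lo = hi := by omega
    rw [heq]
    rfl
  | succ f ih =>
    intro lo hi h1 hhi h3
    simp only [pvBRgo]
    by_cases hlt : lo < hi
    · rw [if_pos hlt]
      have hmid : (lo + hi) / 2 < a.length := by omega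
      have hget : a.getD ((lo + hi) / 2) 0 = a[(lo + hi) / 2] := List.getD_eq_getElem a 0 hmid
      have hmem : a[(lo + hi) / 2] ∈ a := List.getElem_mem hmid
      rw [if_neg (by rw [hget]; have := h _ hmem; omega)]
      exact ih ((lo + hi) / 2 + 1) hi (by omega) hhi (by omega)
    · rw [if_neg hlt]; omega

lemma pvbr_low (L : List Int) (x : Int) (h : ∀ v ∈ L, x < v) :
    pvBisectRight L x = 0 := by
  unfold pvBisectRight
  exact pvBRgo_low L x h _ 0 _ le_rfl

lemma pvbr_high (L : List Int) (x : Int) (h : ∀ v ∈ L, v ≤ x) :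
    pvBisectRight L x = L.length := by
  unfold pvBisectRight
  exact pvBRgo_high L x h _ 0 _ (Nat.zero_le _) le_rfl (by omega)

-- Below the earliest vintage (2011) both programs return the empty dict.
lemma pv_low (year : Int) (h : year < 2011) :
    get_stewi_invent_years year = get_stewi_invent_years_alt year := by
  have m1 : ∀ v ∈ ([2014, 2016, 2018, 2019, 2020, 2021] : List Int), year < v := by
    intro v hv; fin_cases hv <;> omega
  have m2 : ∀ v ∈ ([2011, 2014, 2017, 2020] : List Int), year < v := by
    intro v hv; fin_cases hv <;> omega
  have m3 : ∀ v ∈ ([2011, 2013, 2015, 2017, 2019, 2021] : List Int), year < v := by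
    intro v hv; fin_cases hv <;> omega
  have m4 : ∀ v ∈ ([2011, 2012, 2013, 2014, 2015, 2016, 2017, 2018, 2019, 2020, 2021, 2022] : List Int), year < v := by
    intro v hv; fin_cases hv <;> omega
  simp only [get_stewi_invent_years, get_stewi_invent_years_alt, pv_keys, pv_itemsB,
    List.foldl, pv_g1, pv_g2, pv_g3, pv_g4,
    pvls_low _ year m1, pvls_low _ year m2, pvls_low _ year m3, pvls_low _ year m4,
    pvbr_low _ year m1, pvbr_low _ year m2, pvbr_low _ year m3, pvbr_low _ year m4]
  decide

-- From 2022 on both programs return the latest vintage of every inventory.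
lemma pv_high (year : Int) (h : 2022 ≤ year) :
    get_stewi_invent_years year = get_stewi_invent_years_alt year := by
  have m1 : ∀ v ∈ ([2014, 2016, 2018, 2019, 2020, 2021] : List Int), v ≤ year := by
    intro v hv; fin_cases hv <;> omega
  have m2 : ∀ v ∈ ([2011, 2014, 2017, 2020] : List Int), v ≤ year := by
    intro v hv; fin_cases hv <;> omega
  have m3 : ∀ v ∈ ([2011, 2013, 2015, 2017, 2019, 2021] : List Int), v ≤ year := by
    intro v hv; fin_cases hv <;> omega
  have m4 : ∀ v ∈ ([2011, 2012, 2013, 2014, 2015, 2016, 2017, 2018, 2019, 2020, 2021, 2022] : List Int), v ≤ year := by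
    intro v hv; fin_cases hv <;> omega
  have l1 : linear_search [2014, 2016, 2018, 2019, 2020, 2021] year = 5 := by
    unfold linear_search; norm_num; rw [pv_r6]; exact pvLSgo_head _ year 5 _ 2021 (by decide) (by omega)
  have l2 : linear_search [2011, 2014, 2017, 2020] year = 3 := by
    unfold linear_search; norm_num; rw [pv_r4]; exact pvLSgo_head _ year 3 _ 2020 (by decide) (by omega)
  have l3 : linear_search [2011, 2013, 2015, 2017, 2019, 2021] year = 5 := by
    unfold linear_search; norm_num; rw [pv_r6]; exact pvLSgo_head _ year 5 _ 2021 (by decide) (by omega)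
  have l4 : linear_search [2011, 2012, 2013, 2014, 2015, 2016, 2017, 2018, 2019, 2020, 2021, 2022] year = 11 := by
    unfold linear_search; norm_num; rw [pv_r12]; exact pvLSgo_head _ year 11 _ 2022 (by decide) (by omega)
  simp only [get_stewi_invent_years, get_stewi_invent_years_alt, pv_keys, pv_itemsB,
    List.foldl, pv_g1, pv_g2, pv_g3, pv_g4, l1, l2, l3, l4,
    pvbr_high _ year m1, pvbr_high _ year m2, pvbr_high _ year m3, pvbr_high _ year m4]
  decide

-- ===== VERDICT (by name: the statement is the Claim_ definition above) =====
theorem get_stewi_invent_years_spec : Claim_equal_get_stewi_invent_years := by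
  intro year _
  unfold Spec_get_stewi_invent_years
  rcases lt_or_ge year 2011 with h | h
  · exact pv_low year h
  rcases lt_or_ge year 2022 with h2 | h2
  · interval_cases year <;> decide
  · exact pv_high year h2
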